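-- pv_equiv track=rewrite | github.com/natedey/RINRUS-oldpublic | lib3/read_probe.py | check_mc
-- ===== SOURCE A (Python) =====
-- def check_mc(res,value,atoms):
--     case1 = ['N','H']
--     case2 = ['C','O']
--     case3 = ['N','CA','C','O','H','HA','HA2','HA3']
--     case4 = ['CA','HA','HA2','HA3']
--     if bool(set(value)&set(case1)) and 'C' not in value and 'O' not in value:
--         for i in ['N','CA','H','HA','HA2','HA3']:
--             atoms.append(i)
--     elif bool(set(value)&set(case2)) and 'N' not in value and 'H' not in value:
--         for i in ['CA','C','O','HA','HA2','HA3']: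
--             atoms.append(i)
--     elif 'N' not in value and 'H' not in value and 'C' not in value and 'O' not in value:
--         for i in ['CA','HA','HA2','HA3']:
--             atoms.append(i)
--     elif bool(set(value)&set(case1)) and bool(set(value)&set(case2)):
--         for i in case3:
--             atoms.append(i)
--     else:
--         for i in case3:
--             atoms.append(i)
--     return atoms
-- ===== SOURCE B (Python) =====
-- def check_mc(res, value, atoms):
--     # Filter view: always keep CA/HA/HA2/HA3; keep N,H only if the N-side
--     # ('N' or 'H') occurs in value, keep C,O only if the C-side ('C' or 'O') does.
--     has_n_side = 'N' in value or 'H' in value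
--     has_c_side = 'C' in value or 'O' in value
--     for i in ['N', 'CA', 'C', 'O', 'H', 'HA', 'HA2', 'HA3']:
--         if (i in ('N', 'H') and not has_n_side) or (i in ('C', 'O') and not has_c_side):
--             continue
--         atoms.append(i)
--     return atoms
-- ===== Notes on version B (the rewrite author's own statement) =====
-- stated objective: simpler
-- what changed: Replaces the four-way branch cascade with per-case atom lists by a single filtering pass over the canonical backbone list ['N','CA','C','O','H','HA','HA2','HA3'], skipping N/H when no N-side atom is in value and C/O when no C-side atom is, which yields exactly each case's list.
import Mathlib
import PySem

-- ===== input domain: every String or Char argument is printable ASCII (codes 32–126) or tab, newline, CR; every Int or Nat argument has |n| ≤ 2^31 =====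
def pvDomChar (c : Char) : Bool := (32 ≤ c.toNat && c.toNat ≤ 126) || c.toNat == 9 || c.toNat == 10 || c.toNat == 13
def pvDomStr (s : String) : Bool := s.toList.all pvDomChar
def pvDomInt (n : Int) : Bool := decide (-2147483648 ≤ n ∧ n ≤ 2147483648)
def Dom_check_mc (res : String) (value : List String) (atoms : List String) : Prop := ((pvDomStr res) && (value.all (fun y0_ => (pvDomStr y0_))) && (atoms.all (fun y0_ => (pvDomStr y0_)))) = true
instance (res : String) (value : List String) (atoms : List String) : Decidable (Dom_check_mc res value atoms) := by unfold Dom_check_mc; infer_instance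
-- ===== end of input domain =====

-- B replaces A's branch cascade (one hard-coded atom list per case) by one filtering pass over
-- the canonical backbone list (simpler decomposition, same cost). Equivalence is about the
-- RETURN value; the Python versions also mutate `atoms` in place (both append the same suffix).

-- ===== PORT A =====
def check_mc (res : String) (value : List String) (atoms : List String) : List String :=
  let case1 := ["N", "H"]
  let case2 := ["C", "O"]
  let case3 := ["N", "CA", "C", "O", "H", "HA", "HA2", "HA3"]
  let case4 := ["CA", "HA", "HA2", "HA3"]
  if PySem.Set.inter (PySem.Set.ofList value) (PySem.Set.ofList case1) ≠ [] ∧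
      "C" ∉ value ∧ "O" ∉ value then
    (["N", "CA", "H", "HA", "HA2", "HA3"]).foldl (fun acc i => acc ++ [i]) atoms
  else if PySem.Set.inter (PySem.Set.ofList value) (PySem.Set.ofList case2) ≠ [] ∧
      "N" ∉ value ∧ "H" ∉ value then
    (["CA", "C", "O", "HA", "HA2", "HA3"]).foldl (fun acc i => acc ++ [i]) atoms
  else if "N" ∉ value ∧ "H" ∉ value ∧ "C" ∉ value ∧ "O" ∉ value then
    case4.foldl (fun acc i => acc ++ [i]) atoms
  else if PySem.Set.inter (PySem.Set.ofList value) (PySem.Set.ofList case1) ≠ [] ∧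
      PySem.Set.inter (PySem.Set.ofList value) (PySem.Set.ofList case2) ≠ [] then
    case3.foldl (fun acc i => acc ++ [i]) atoms
  else
    case3.foldl (fun acc i => acc ++ [i]) atoms

-- ===== PORT B =====
def check_mc_alt (res : String) (value : List String) (atoms : List String) : List String :=
  let hasNSide : Bool := decide ("N" ∈ value) || decide ("H" ∈ value)
  let hasCSide : Bool := decide ("C" ∈ value) || decide ("O" ∈ value)
  (["N", "CA", "C", "O", "H", "HA", "HA2", "HA3"]).foldl
    (fun acc i =>
      if (i ∈ (["N", "H"] : List String) ∧ hasNSide = false) ∨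
          (i ∈ (["C", "O"] : List String) ∧ hasCSide = false) then acc
      else acc ++ [i]) atoms

-- ===== PRECONDITION & SPEC =====
def Spec_check_mc (res : String) (value : List String) (atoms : List String) (out : List String) : Prop := out = check_mc_alt res value atoms
instance (res : String) (value : List String) (atoms : List String) (out : List String) : Decidable (Spec_check_mc res value atoms out) := by unfold Spec_check_mc; infer_instance

-- ===== CLAIM (what is proved, stated in full; the proofs are below) =====
def Claim_equal_check_mc : Prop := ∀ (res : String) (value : List String) (atoms : List String), Dom_check_mc res value atoms → Spec_check_mc res value atoms (check_mc res value atoms)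

-- ===== LEMMAS AND PROOFS =====
theorem inter_ne_nil (value L : List String) :
    (PySem.Set.inter (PySem.Set.ofList value) (PySem.Set.ofList L) ≠ []) ↔ ∃ x ∈ L, x ∈ value := by
  rw [Ne, List.eq_nil_iff_forall_not_mem]
  push_neg
  constructor
  · rintro ⟨x, hx⟩
    rw [PySem.Set.mem_inter, PySem.Set.mem_ofList, PySem.Set.mem_ofList] at hx
    exact ⟨x, hx.2, hx.1⟩
  · rintro ⟨x, hL, hv⟩
    exact ⟨x, by rw [PySem.Set.mem_inter, PySem.Set.mem_ofList, PySem.Set.mem_ofList]; exact ⟨hv, hL⟩⟩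

-- ===== VERDICT (by name: the statement is the Claim_ definition above) =====
theorem check_mc_spec : Claim_equal_check_mc := by
  intro res value atoms _
  unfold Spec_check_mc check_mc check_mc_alt
  by_cases hN : "N" ∈ value <;> by_cases hH : "H" ∈ value <;>
    by_cases hC : "C" ∈ value <;> by_cases hO : "O" ∈ value <;>
    simp [inter_ne_nil, hN, hH, hC, hO, List.foldl]
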